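-- pv_equiv track=rewrite | github.com/Vagabondluc/world-model | scripts/gates/phase_1_contracts.py | _diff_maps
-- ===== SOURCE A (Python) =====
-- def _diff_maps(expected: dict[str, str], actual: dict[str, str]) -> list[str]:
--     diffs: list[str] = []
--     expected_keys = set(expected)
--     actual_keys = set(actual)
--
--     missing = sorted(expected_keys - actual_keys)
--     extra = sorted(actual_keys - expected_keys)
--     changed = sorted(
--         key for key in expected_keys & actual_keys if expected[key] != actual[key]
--     )
--
--     if missing:
--         diffs.append("missing files: " + ", ".join(missing))
--     if extra:
--         diffs.append("extra files: " + ", ".join(extra))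
--     for key in changed:
--         diffs.append(f"content differs: {key}")
--     return diffs
-- ===== SOURCE B (Python) =====
-- def _diff_maps(expected: dict[str, str], actual: dict[str, str]) -> list[str]:
--     e = sorted(expected.items(), key=lambda kv: kv[0])
--     a = sorted(actual.items(), key=lambda kv: kv[0])
--     missing: list[str] = []
--     extra: list[str] = []
--     changed: list[str] = []
--     i = j = 0
--     while i < len(e) and j < len(a):
--         ek, ev = e[i]
--         ak, av = a[j]
--         if ek < ak:
--             missing.append(ek)
--             i += 1
--         elif ak < ek:
--             extra.append(ak)
--             j += 1
--         else:
--             if ev != av: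
--                 changed.append(ek)
--             i += 1
--             j += 1
--     missing += [k for k, _ in e[i:]]
--     extra += [k for k, _ in a[j:]]
--     out: list[str] = []
--     if missing:
--         out.append("missing files: " + ", ".join(missing))
--     if extra:
--         out.append("extra files: " + ", ".join(extra))
--     out += ["content differs: " + k for k in changed]
--     return out
-- ===== Notes on version B (the rewrite author's own statement) =====
-- stated objective: alternative
-- what changed: B replaces A's three separate set operations (two set differences and a filtered intersection, each sorted on its own) by sorting both item lists by key once and running a two-pointer merge that classifies each key as missing, extra or changed in a single sweep; Pre_ only restricts the association lists to distinct keys, since a Python dict cannot hold duplicate keys.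
import Mathlib
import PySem

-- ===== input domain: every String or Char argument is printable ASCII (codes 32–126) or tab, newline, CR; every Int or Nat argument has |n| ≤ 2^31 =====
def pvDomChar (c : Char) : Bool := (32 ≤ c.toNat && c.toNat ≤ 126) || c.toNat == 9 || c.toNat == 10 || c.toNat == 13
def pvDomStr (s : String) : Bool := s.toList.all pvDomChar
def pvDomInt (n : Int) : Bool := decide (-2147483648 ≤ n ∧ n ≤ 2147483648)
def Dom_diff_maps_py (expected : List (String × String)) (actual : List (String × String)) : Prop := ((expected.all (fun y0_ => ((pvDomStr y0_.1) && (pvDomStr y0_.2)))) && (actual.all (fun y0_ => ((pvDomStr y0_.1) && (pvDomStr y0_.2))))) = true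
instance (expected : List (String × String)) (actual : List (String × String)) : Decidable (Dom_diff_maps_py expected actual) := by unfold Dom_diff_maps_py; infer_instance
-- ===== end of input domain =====

-- B replaces A's three set operations (two set differences and a filtered intersection, each
-- sorted separately) by a two-pointer MERGE of the two key-sorted item lists that classifies
-- keys as missing/extra/changed in one sweep; same cost, different algorithm (objective: alternative).

-- ===== PORT A =====
-- expected[key]: first-match lookup in the association list (dict convention); only used on present keys
def pvLookupD (m : List (String × String)) (k : String) : String := (m.lookup k).getD ""

def diff_maps_py (expected : List (String × String)) (actual : List (String × String)) : List String :=
  let expected_keys : PySem.Set String := PySem.Set.ofList (expected.map Prod.fst)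
  let actual_keys : PySem.Set String := PySem.Set.ofList (actual.map Prod.fst)
  let missing := PySem.List.sorted (PySem.Set.diff expected_keys actual_keys) (fun x => x) false
  let extra := PySem.List.sorted (PySem.Set.diff actual_keys expected_keys) (fun x => x) false
  let changed := PySem.List.sorted ((PySem.Set.inter expected_keys actual_keys).filter
      (fun key => pvLookupD expected key != pvLookupD actual key)) (fun x => x) false
  let diffs0 : List String := []
  let diffs1 := if missing ≠ [] then diffs0 ++ ["missing files: " ++ PySem.Str.join ", " missing] else diffs0
  let diffs2 := if extra ≠ [] then diffs1 ++ ["extra files: " ++ PySem.Str.join ", " extra] else diffs1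
  changed.foldl (fun diffs key => diffs ++ ["content differs: " ++ key]) diffs2

-- ===== PORT B =====
-- the while loop of Source B: advance two cursors over the key-sorted item lists; the two
-- trailing '+=' over the unconsumed remainders are the base cases
def pvMerge : List (String × String) → List (String × String) → List String × List String × List String
  | es, [] => (es.map Prod.fst, [], [])
  | [], (ak, _) :: as_ => let r := pvMerge [] as_; (r.1, ak :: r.2.1, r.2.2)
  | (ek, ev) :: es, (ak, av) :: as_ =>
    if ek < ak then
      let r := pvMerge es ((ak, av) :: as_); (ek :: r.1, r.2.1, r.2.2)
    else if ak < ek then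
      let r := pvMerge ((ek, ev) :: es) as_; (r.1, ak :: r.2.1, r.2.2)
    else
      let r := pvMerge es as_
      if ev ≠ av then (r.1, r.2.1, ek :: r.2.2) else r
  termination_by es as_ => es.length + as_.length

def diff_maps_py_alt (expected : List (String × String)) (actual : List (String × String)) : List String :=
  let e := PySem.List.sorted expected (fun kv => kv.1) false
  let a := PySem.List.sorted actual (fun kv => kv.1) false
  let r := pvMerge e a
  (if r.1 ≠ [] then ["missing files: " ++ PySem.Str.join ", " r.1] else []) ++
  (if r.2.1 ≠ [] then ["extra files: " ++ PySem.Str.join ", " r.2.1] else []) ++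
  r.2.2.map (fun key => "content differs: " ++ key)

-- ===== PRECONDITION & SPEC =====
-- Pre_ restricts the association lists to distinct keys: a Python dict cannot hold two entries
-- with the same key, so only such lists represent the function's dict[str, str] arguments.
def Pre_diff_maps_py (expected : List (String × String)) (actual : List (String × String)) : Prop :=
  (expected.map Prod.fst).Nodup ∧ (actual.map Prod.fst).Nodup
instance (expected : List (String × String)) (actual : List (String × String)) : Decidable (Pre_diff_maps_py expected actual) := by unfold Pre_diff_maps_py; infer_instance

def pvWitness_diff_maps_py : (List (String × String)) × (List (String × String)) :=
  ([("a", "1"), ("b", "2")], [("a", "1"), ("c", "3")])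

def Spec_diff_maps_py (expected : List (String × String)) (actual : List (String × String)) (out : List String) : Prop := out = diff_maps_py_alt expected actual
instance (expected : List (String × String)) (actual : List (String × String)) (out : List String) : Decidable (Spec_diff_maps_py expected actual out) := by unfold Spec_diff_maps_py; infer_instance

-- ===== CLAIM (what is proved, stated in full; the proofs are below) =====
def Claim_equal_diff_maps_py : Prop := ∀ (expected : List (String × String)) (actual : List (String × String)), Dom_diff_maps_py expected actual → Pre_diff_maps_py expected actual → Spec_diff_maps_py expected actual (diff_maps_py expected actual)

-- ===== LEMMAS AND PROOFS =====

def pvChg (as_ : List (String × String)) (p : String × String) : Bool :=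
  match as_.lookup p.1 with
  | some w => p.2 != w
  | none => false

theorem pv_lookup_none (l : List (String × String)) (k : String) (h : k ∉ l.map Prod.fst) :
    l.lookup k = none := by
  induction l with
  | nil => rfl
  | cons a t ih =>
    simp only [List.map_cons, List.mem_cons, not_or] at h
    obtain ⟨k', v⟩ := a
    have : (k == k') = false := by simp [h.1]
    simp [List.lookup_cons, this, ih h.2]

theorem pv_contains_cons_ne (l : List String) (k a : String) (h : k ≠ a) :
    (a :: l).contains k = l.contains k := by
  rw [List.contains_cons]
  have : (k == a) = false := by simp [h]
  rw [this, Bool.false_or]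

theorem pv_contains_false (l : List String) (k : String) (h : k ∉ l) : l.contains k = false := by
  simp [h]

theorem pvMerge_eq (es as_ : List (String × String)) :
    (es.map Prod.fst).Pairwise (· < ·) → (as_.map Prod.fst).Pairwise (· < ·) →
    pvMerge es as_ =
      ((es.map Prod.fst).filter (fun k => !((as_.map Prod.fst).contains k)),
       (as_.map Prod.fst).filter (fun k => !((es.map Prod.fst).contains k)),
       (es.filter (pvChg as_)).map Prod.fst) := by
  induction es, as_ using pvMerge.induct with
  | case1 es =>
    intro he ha
    simp [pvMerge, pvChg]
  | case2 ak av as_ ih =>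
    intro he ha
    rw [List.map_cons] at ha; dsimp only at ha
    have h2 := ih he ha.tail
    simp only [pvMerge, h2, List.map_nil, List.map_cons, List.filter_nil, List.filter_cons]
    simp
  | case3 ek ev es ak av as_ hlt ih =>
    intro he ha
    rw [List.map_cons] at he ha; dsimp only at he ha
    have hek_not : ek ∉ ak :: as_.map Prod.fst := by
      intro hm
      rcases List.mem_cons.1 hm with h | h
      · exact absurd hlt (by simp_all)
      · exact absurd (hlt.trans ((List.pairwise_cons.1 ha).1 ek h)) (lt_irrefl ek)
    have h2 := ih he.tail (by simpa using ha)
    rw [pvMerge, if_pos hlt, h2]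
    simp only [List.map_cons]
    refine Prod.ext ?_ (Prod.ext ?_ ?_)
    · dsimp only
      rw [List.filter_cons]
      rw [pv_contains_false _ _ hek_not]
      simp
    · dsimp only
      apply List.filter_congr
      intro k hk
      have hkek : k ≠ ek := fun h => hek_not (h ▸ hk)
      rw [pv_contains_cons_ne _ _ _ hkek]
    · dsimp only
      rw [List.filter_cons]
      have hhd : pvChg ((ak, av) :: as_) (ek, ev) = false := by
        unfold pvChg
        have : ((ak, av) :: as_).lookup ek = none := pv_lookup_none _ _ (by simpa using hek_not)
        simp [this]
      simp [hhd]
  | case4 ek ev es ak av as_ hnlt hlt ih =>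
    intro he ha
    rw [List.map_cons] at he ha; dsimp only at he ha
    have hak_not : ak ∉ ek :: es.map Prod.fst := by
      intro hm
      rcases List.mem_cons.1 hm with h | h
      · exact absurd hlt (by simp_all)
      · exact absurd (hlt.trans ((List.pairwise_cons.1 he).1 ak h)) (lt_irrefl ak)
    have h2 := ih (by simpa using he) ha.tail
    rw [pvMerge, if_neg hnlt, if_pos hlt, h2]
    simp only [List.map_cons]
    refine Prod.ext ?_ (Prod.ext ?_ ?_)
    · dsimp only
      apply List.filter_congr
      intro k hk
      have hkak : k ≠ ak := fun h => hak_not (h ▸ hk)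
      rw [pv_contains_cons_ne _ _ _ hkak]
    · dsimp only
      rw [List.filter_cons]
      rw [pv_contains_false _ _ hak_not]
      simp
    · dsimp only
      apply congrArg
      apply List.filter_congr
      intro p hp
      have hpk : (p.1 == ak) = false := by
        have : p.1 ≠ ak := by
          intro heq
          apply hak_not
          rw [← heq]
          rcases List.mem_cons.1 hp with h | h
          · simp [h]
          · exact List.mem_cons_of_mem _ (List.mem_map_of_mem h)
        simp [this]
      unfold pvChg
      simp [List.lookup_cons, hpk]
  | case5 ek ev es ak av as_ hn1 hn2 hne ih =>
    intro he ha
    have heq : ek = ak := le_antisymm (not_lt.1 hn2) (not_lt.1 hn1)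
    subst heq
    rw [List.map_cons] at he ha; dsimp only at he ha
    have h2 := ih he.tail ha.tail
    rw [pvMerge, if_neg hn1, if_neg hn2, if_pos hne, h2]
    simp only [List.map_cons]
    refine Prod.ext ?_ (Prod.ext ?_ ?_)
    · dsimp only
      rw [List.filter_cons]
      have hc : ((ek :: as_.map Prod.fst).contains ek) = true := by simp
      rw [hc]
      simp only [Bool.not_true, if_neg Bool.false_ne_true]
      apply List.filter_congr
      intro k hk
      have hkek : k ≠ ek := by
        intro h; subst h; exact absurd ((List.pairwise_cons.1 he).1 k hk) (lt_irrefl k)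
      rw [pv_contains_cons_ne _ _ _ hkek]
    · dsimp only
      rw [List.filter_cons]
      have hc : ((ek :: es.map Prod.fst).contains ek) = true := by simp
      rw [hc]
      simp only [Bool.not_true, if_neg Bool.false_ne_true]
      apply List.filter_congr
      intro k hk
      have hkek : k ≠ ek := by
        intro h; subst h; exact absurd ((List.pairwise_cons.1 ha).1 k hk) (lt_irrefl k)
      rw [pv_contains_cons_ne _ _ _ hkek]
    · dsimp only
      rw [List.filter_cons]
      have hhd : pvChg ((ek, av) :: as_) (ek, ev) = true := by
        unfold pvChg; simp [hne]
      rw [hhd]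
      show _ = ek :: (List.filter (pvChg ((ek, av) :: as_)) es).map Prod.fst
      apply congrArg
      apply congrArg
      apply List.filter_congr
      intro p hp
      have hpk : (p.1 == ek) = false := by
        have : p.1 ≠ ek := by
          intro heq
          have hm : p.1 ∈ es.map Prod.fst := List.mem_map_of_mem hp
          rw [heq] at hm
          exact absurd ((List.pairwise_cons.1 he).1 ek hm) (lt_irrefl ek)
        simp [this]
      unfold pvChg
      simp [List.lookup_cons, hpk]
  | case6 ek ev es ak av as_ hn1 hn2 hne ih =>
    intro he ha
    have heq : ek = ak := le_antisymm (not_lt.1 hn2) (not_lt.1 hn1)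
    subst heq
    have hveq : ev = av := not_ne_iff.1 hne
    subst hveq
    rw [List.map_cons] at he ha; dsimp only at he ha
    have h2 := ih he.tail ha.tail
    rw [pvMerge, if_neg hn1, if_neg hn2, if_neg hne, h2]
    simp only [List.map_cons]
    refine Prod.ext ?_ (Prod.ext ?_ ?_)
    · dsimp only
      rw [List.filter_cons]
      have hc : ((ek :: as_.map Prod.fst).contains ek) = true := by simp
      rw [hc]
      simp only [Bool.not_true, if_neg Bool.false_ne_true]
      apply List.filter_congr
      intro k hk
      have hkek : k ≠ ek := by
        intro h; subst h; exact absurd ((List.pairwise_cons.1 he).1 k hk) (lt_irrefl k)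
      rw [pv_contains_cons_ne _ _ _ hkek]
    · dsimp only
      rw [List.filter_cons]
      have hc : ((ek :: es.map Prod.fst).contains ek) = true := by simp
      rw [hc]
      simp only [Bool.not_true, if_neg Bool.false_ne_true]
      apply List.filter_congr
      intro k hk
      have hkek : k ≠ ek := by
        intro h; subst h; exact absurd ((List.pairwise_cons.1 ha).1 k hk) (lt_irrefl k)
      rw [pv_contains_cons_ne _ _ _ hkek]
    · dsimp only
      rw [List.filter_cons]
      have hhd : pvChg ((ek, ev) :: as_) (ek, ev) = false := by
        unfold pvChg; simp
      rw [hhd]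
      simp only [if_neg Bool.false_ne_true]
      apply congrArg
      apply List.filter_congr
      intro p hp
      have hpk : (p.1 == ek) = false := by
        have : p.1 ≠ ek := by
          intro heq
          have hm : p.1 ∈ es.map Prod.fst := List.mem_map_of_mem hp
          rw [heq] at hm
          exact absurd ((List.pairwise_cons.1 he).1 ek hm) (lt_irrefl ek)
        simp [this]
      unfold pvChg
      simp [List.lookup_cons, hpk]

-- lookup of a key known to be present / absent, and first-match lookup under permutation
theorem pv_lookup_isSome (l : List (String × String)) (k : String) :
    (l.lookup k).isSome = true ↔ k ∈ l.map Prod.fst := by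
  induction l with
  | nil => simp
  | cons a t ih =>
    obtain ⟨k', v⟩ := a
    by_cases h : k = k'
    · subst h; simp
    · have : (k == k') = false := by simp [h]
      simp [List.lookup_cons, this, ih, h]

theorem pv_lookup_mem (l : List (String × String)) (hnd : (l.map Prod.fst).Nodup) (p : String × String) :
    p ∈ l ↔ l.lookup p.1 = some p.2 := by
  obtain ⟨pk, pv⟩ := p
  induction l with
  | nil => simp
  | cons a t ih =>
    simp only [List.map_cons, List.nodup_cons, List.mem_map] at hnd
    obtain ⟨hna, hnt⟩ := hnd
    obtain ⟨k, v⟩ := a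
    by_cases h : k = pk
    · subst h
      simp only [List.mem_cons, List.lookup_cons, beq_self_eq_true, Prod.mk.injEq, true_and,
        Option.some.injEq]
      constructor
      · rintro (rfl | hm)
        · rfl
        · exact absurd ⟨(k, pv), hm, rfl⟩ hna
      · intro hv; left; exact hv.symm
    · have hb : (pk == k) = false := by simp [Ne.symm h]
      simp only [List.mem_cons, List.lookup_cons, hb, Prod.mk.injEq, ih hnt]
      constructor
      · rintro (⟨rfl, rfl⟩ | hm)
        · exact absurd rfl h
        · exact hm
      · intro hm; right; exact hm

theorem pv_lookup_perm (l l' : List (String × String)) (h : l.Perm l')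
    (hnd : (l.map Prod.fst).Nodup) (k : String) : l.lookup k = l'.lookup k := by
  have hnd' : (l'.map Prod.fst).Nodup := ((h.map Prod.fst).nodup_iff).1 hnd
  cases hl : l.lookup k with
  | none =>
    cases hl' : l'.lookup k with
    | none => rfl
    | some w =>
      exfalso
      have hm : (k, w) ∈ l := h.symm.subset ((pv_lookup_mem l' hnd' (k, w)).2 hl')
      rw [pv_lookup_mem l hnd (k, w)] at hm
      simp [hm] at hl
  | some w =>
    have hm : (k, w) ∈ l' := h.subset ((pv_lookup_mem l hnd (k, w)).2 hl)
    exact ((pv_lookup_mem l' hnd' (k, w)).1 hm).symm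

-- ===== VERDICT (by name: the statement is the Claim_ definition above) =====
theorem diff_maps_py_spec : Claim_equal_diff_maps_py := by
  intro expected actual _ hpre
  obtain ⟨hep, hap⟩ := hpre
  unfold Spec_diff_maps_py diff_maps_py diff_maps_py_alt
  dsimp only
  set ek := expected.map Prod.fst with hek
  set ak := actual.map Prod.fst with hak
  set e := PySem.List.sorted expected (fun kv => kv.1) false with he
  set a := PySem.List.sorted actual (fun kv => kv.1) false with ha
  have heperm : e.Perm expected := PySem.List.sorted_perm expected (fun kv => kv.1) false
  have haperm : a.Perm actual := PySem.List.sorted_perm actual (fun kv => kv.1) false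
  have hend : (e.map Prod.fst).Nodup := ((heperm.map Prod.fst).nodup_iff).2 hep
  have hand : (a.map Prod.fst).Nodup := ((haperm.map Prod.fst).nodup_iff).2 hap
  have hele : (e.map Prod.fst).Pairwise (· ≤ ·) := by
    have := PySem.List.sorted_pairwise expected (fun kv => kv.1)
    rw [← he] at this
    exact (List.pairwise_map).2 this
  have hale : (a.map Prod.fst).Pairwise (· ≤ ·) := by
    have := PySem.List.sorted_pairwise actual (fun kv => kv.1)
    rw [← ha] at this
    exact (List.pairwise_map).2 this
  have hepair : (e.map Prod.fst).Pairwise (· < ·) :=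
    (hele.and hend).imp (fun h => lt_of_le_of_ne h.1 h.2)
  have hapair : (a.map Prod.fst).Pairwise (· < ·) :=
    (hale.and hand).imp (fun h => lt_of_le_of_ne h.1 h.2)
  have hemem : ∀ k, k ∈ e.map Prod.fst ↔ k ∈ ek := fun k => (heperm.map Prod.fst).mem_iff
  have hamem : ∀ k, k ∈ a.map Prod.fst ↔ k ∈ ak := fun k => (haperm.map Prod.fst).mem_iff
  have helook : ∀ k, e.lookup k = expected.lookup k := pv_lookup_perm e expected heperm hend
  have halook : ∀ k, a.lookup k = actual.lookup k := pv_lookup_perm a actual haperm hand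
  rw [pvMerge_eq e a hepair hapair]
  -- the three bucket lists of B are A's three sorted set computations
  have hmiss : PySem.List.sorted (PySem.Set.diff (PySem.Set.ofList ek) (PySem.Set.ofList ak)) (fun x => x) false
      = (e.map Prod.fst).filter (fun k => !((a.map Prod.fst).contains k)) := by
    apply PySem.List.sorted_eq_of_perm_of_pairwise_lt
    · refine (List.perm_ext_iff_of_nodup ?_ ?_).2 ?_
      · exact hepair.sublist (List.filter_sublist) |>.imp (fun h => ne_of_lt h)
      · exact PySem.Set.nodup_diff _ _ (PySem.Set.nodup_ofList ek)
      · intro k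
        rw [List.mem_filter, PySem.Set.mem_diff, PySem.Set.mem_ofList, PySem.Set.mem_ofList,
          hemem k]
        simp [hamem k]
    · exact hepair.sublist (List.filter_sublist)
  have hextra : PySem.List.sorted (PySem.Set.diff (PySem.Set.ofList ak) (PySem.Set.ofList ek)) (fun x => x) false
      = (a.map Prod.fst).filter (fun k => !((e.map Prod.fst).contains k)) := by
    apply PySem.List.sorted_eq_of_perm_of_pairwise_lt
    · refine (List.perm_ext_iff_of_nodup ?_ ?_).2 ?_
      · exact hapair.sublist (List.filter_sublist) |>.imp (fun h => ne_of_lt h)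
      · exact PySem.Set.nodup_diff _ _ (PySem.Set.nodup_ofList ak)
      · intro k
        rw [List.mem_filter, PySem.Set.mem_diff, PySem.Set.mem_ofList, PySem.Set.mem_ofList,
          hamem k]
        simp [hemem k]
    · exact hapair.sublist (List.filter_sublist)
  have hLpair : ((e.filter (pvChg a)).map Prod.fst).Pairwise (· < ·) :=
    hepair.sublist ((List.filter_sublist).map Prod.fst)
  have hLmem : ∀ k, k ∈ (e.filter (pvChg a)).map Prod.fst ↔
      (k ∈ ek ∧ k ∈ ak ∧ pvLookupD expected k ≠ pvLookupD actual k) := by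
    intro k
    constructor
    · intro hk
      obtain ⟨p, hpf, rfl⟩ := List.mem_map.1 hk
      obtain ⟨hpe, hchg⟩ := List.mem_filter.1 hpf
      have hlookE : expected.lookup p.1 = some p.2 := by
        rw [← helook p.1]; exact (pv_lookup_mem e hend p).1 hpe
      unfold pvChg at hchg
      cases hal : a.lookup p.1 with
      | none => rw [hal] at hchg; simp at hchg
      | some w =>
        rw [hal] at hchg
        have hvw : p.2 ≠ w := by simpa using hchg
        have hlookA : actual.lookup p.1 = some w := by rw [← halook p.1]; exact hal
        refine ⟨(pv_lookup_isSome expected p.1).1 (by simp [hlookE]),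
          (pv_lookup_isSome actual p.1).1 (by simp [hlookA]), ?_⟩
        unfold pvLookupD
        rw [hlookE, hlookA]
        simpa using hvw
    · rintro ⟨hke, hka, hne⟩
      cases hEl : expected.lookup k with
      | none =>
        exact absurd ((pv_lookup_isSome expected k).2 hke) (by simp [hEl])
      | some v =>
        cases hAl : actual.lookup k with
        | none =>
          exact absurd ((pv_lookup_isSome actual k).2 hka) (by simp [hAl])
        | some w =>
          have hvw : v ≠ w := by
            unfold pvLookupD at hne
            rw [hEl, hAl] at hne
            simpa using hne
          have hpe : (k, v) ∈ e := by
            rw [heperm.mem_iff]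
            exact (pv_lookup_mem expected hep (k, v)).2 hEl
          refine List.mem_map.2 ⟨(k, v), List.mem_filter.2 ⟨hpe, ?_⟩, rfl⟩
          unfold pvChg
          dsimp only
          rw [halook k, hAl]
          simpa using hvw
  have hchanged : PySem.List.sorted ((PySem.Set.inter (PySem.Set.ofList ek) (PySem.Set.ofList ak)).filter
        (fun key => pvLookupD expected key != pvLookupD actual key)) (fun x => x) false
      = (e.filter (pvChg a)).map Prod.fst := by
    apply PySem.List.sorted_eq_of_perm_of_pairwise_lt
    · refine (List.perm_ext_iff_of_nodup ?_ ?_).2 ?_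
      · exact hLpair.imp (fun h => ne_of_lt h)
      · exact (PySem.Set.nodup_inter _ _ (PySem.Set.nodup_ofList ek)).filter _
      · intro k
        rw [hLmem k, List.mem_filter, PySem.Set.mem_inter, PySem.Set.mem_ofList,
          PySem.Set.mem_ofList]
        simp [and_assoc]
    · exact hLpair
  rw [hmiss, hextra, hchanged, PySem.List.foldl_append_singleton_eq_map]
  split_ifs <;> simp
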